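-- pv_equiv track=rewrite | github.com/kush0o7/Sentiment_Analysis_Bot | src/stock_data.py | _period_to_days
-- ===== SOURCE A (Python) =====
-- _PERIOD_MULTIPLIERS = {
--     "d": 1,
--     "wk": 7,
--     "mo": 30,
--     "y": 365,
-- }
--
-- def _period_to_days(period: str) -> int | None:
--     """
--     Convert a Yahoo-style period string to an approximate day count.
--     Examples: 60d, 6mo, 1y. Returns None for "max" or unknown formats.
--     """
--     if not period:
--         return None
--     p = period.strip().lower()
--     if p == "max":
--         return None
--     for unit, mult in _PERIOD_MULTIPLIERS.items():
--         if p.endswith(unit):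
--             try:
--                 n = int(p[: -len(unit)])
--             except ValueError:
--                 return None
--             return n * mult
--     return None
-- ===== SOURCE B (Python) =====
-- _PERIOD_MULTIPLIERS = {
--     "d": 1,
--     "wk": 7,
--     "mo": 30,
--     "y": 365,
-- }
--
-- def _period_to_days(period: str) -> int | None:
--     if not period:
--         return None
--     p = period.strip().lower()
--     if p == "max":
--         return None
--     # split off the maximal trailing run of alphabetic characters as the unit
--     i = len(p)
--     while i > 0 and p[i - 1].isalpha():
--         i -= 1
--     mult = _PERIOD_MULTIPLIERS.get(p[i:])
--     if mult is None:
--         return None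
--     try:
--         return int(p[:i]) * mult
--     except ValueError:
--         return None
-- ===== Notes on version B (the rewrite author's own statement) =====
-- stated objective: alternative
-- what changed: B replaces A's ordered scan of the multiplier table with an endswith test per unit by a single right-to-left scan that splits off the maximal trailing run of alphabetic characters as the unit, followed by one dict lookup and one int() parse of the numeric prefix.
import Mathlib
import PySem

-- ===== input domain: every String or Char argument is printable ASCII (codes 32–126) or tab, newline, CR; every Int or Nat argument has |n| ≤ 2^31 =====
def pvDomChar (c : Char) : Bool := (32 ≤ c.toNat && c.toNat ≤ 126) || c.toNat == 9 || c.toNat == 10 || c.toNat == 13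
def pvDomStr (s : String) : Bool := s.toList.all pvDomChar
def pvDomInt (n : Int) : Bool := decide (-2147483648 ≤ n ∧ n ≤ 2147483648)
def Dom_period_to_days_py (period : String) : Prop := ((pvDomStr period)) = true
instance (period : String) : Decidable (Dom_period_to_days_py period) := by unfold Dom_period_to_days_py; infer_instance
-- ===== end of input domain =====

-- B replaces A's ordered scan of the multiplier table (endswith per unit) by one right-to-left
-- scan that splits off the maximal trailing alphabetic run as the unit, then a single dict
-- lookup and one int() parse; objective: alternative decomposition, equal asymptotic cost.


-- ===== PORT A =====
-- _PERIOD_MULTIPLIERS (insertion order)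
def periodMultipliers : List (List Char × Int) :=
  [(['d'], 1), (['w','k'], 7), (['m','o'], 30), (['y'], 365)]

-- the 'for unit, mult in _PERIOD_MULTIPLIERS.items(): if p.endswith(unit): …' loop
def periodLoop (p : List Char) : List (List Char × Int) → Option Int
  | [] => none
  | (unit, mult) :: rest =>
    if PySem.Chars.endswith p unit then
      match PySem.Int.ofChars? (PySem.List.slice p none (some (-(unit.length : Int)))) with
      | none => none                       -- except ValueError: return None
      | some n => some (n * mult)          -- return n * mult
    else periodLoop p rest

def period_to_days_py (period : String) : Option Int :=
  if period.toList = [] then none          -- if not period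
  else
    let p := PySem.Chars.lower (PySem.Chars.strip period.toList)
    if p = ['m','a','x'] then none
    else periodLoop p periodMultipliers

-- ===== PORT B =====
-- _PERIOD_MULTIPLIERS again, as the dict B looks the unit up in
def pmDict : PySem.Dict (List Char) Int :=
  PySem.Dict.ofList [(['d'], 1), (['w','k'], 7), (['m','o'], 30), (['y'], 365)]

-- the 'i = len(p); while i > 0 and p[i-1].isalpha(): i -= 1' loop, recursing on i
-- (p[i-1] is always in range here, so List.getD is exact for Python's p[i-1])
def runLoop (p : List Char) : Nat → Nat
  | 0 => 0
  | i + 1 => if PySem.Chars.isalpha (p.getD i ' ') = true then runLoop p i else i + 1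

def period_to_days_py_alt (period : String) : Option Int :=
  if period.toList = [] then none          -- if not period
  else
    let p := PySem.Chars.lower (PySem.Chars.strip period.toList)
    if p = ['m','a','x'] then none
    else
      let i := runLoop p p.length
      match PySem.Dict.get? pmDict (PySem.List.slice p (some (i : Int)) none) with
      | none => none                       -- if mult is None: return None
      | some m =>
        match PySem.Int.ofChars? (PySem.List.slice p none (some (i : Int))) with
        | none => none                     -- except ValueError: return None
        | some n => some (n * m)           -- return int(p[:i]) * mult

-- ===== PRECONDITION & SPEC =====
def Spec_period_to_days_py (period : String) (out : Option Int) : Prop := out = period_to_days_py_alt period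
instance (period : String) (out : Option Int) : Decidable (Spec_period_to_days_py period out) := by unfold Spec_period_to_days_py; infer_instance

-- ===== CLAIM (what is proved, stated in full; the proofs are below) =====
def Claim_equal_period_to_days_py : Prop := ∀ (period : String), Dom_period_to_days_py period → Spec_period_to_days_py period (period_to_days_py period)

-- ===== LEMMAS AND PROOFS =====

theorem pvMapBindNone {α β γ : Type} (o : Option α) (f : α → Option β) (g : β → γ)
    (h : o = none) : Option.map g (o.bind f) = none := by subst h; rfl

theorem pvGoNone (F : List Char → Bool → ℕ → Option ℕ) (c : Char)
    (hF1 : ∀ (d : Char) (a : Bool) (acc : ℕ), F [d] a acc =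
      if d.isDigit = true then some (acc * 10 + (d.toNat - '0'.toNat))
      else if d = '_' ∧ a = true then none else none)
    (hF2 : ∀ (d e : Char) (rest : List Char) (a : Bool) (acc : ℕ), F (d :: e :: rest) a acc =
      if d.isDigit = true then F (e :: rest) true (acc * 10 + (d.toNat - '0'.toNat))
      else if d = '_' ∧ a = true then (if e.isDigit = true then F (e :: rest) false acc else none)
      else none)
    (hcd : c.isDigit = false) (hcu : c ≠ '_') :
    ∀ (zs : List Char) (a : Bool) (acc : ℕ), F (zs ++ [c]) a acc = none := by
  intro zs
  induction zs with
  | nil => intro a acc; rw [List.nil_append, hF1, hcd]; simp [hcu]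
  | cons z zs ih =>
    intro a acc
    cases zs with
    | nil =>
      rw [List.cons_append, List.nil_append, hF2]
      by_cases hz : z.isDigit = true
      · simp only [hz, if_true]
        have := hF1 c true (acc * 10 + (z.toNat - '0'.toNat))
        rw [this, hcd]; simp [hcu]
      · simp [hz, hcd]
    | cons w ws =>
      rw [List.cons_append, List.cons_append, hF2]
      by_cases hz : z.isDigit = true
      · simpa [hz] using ih true (acc * 10 + (z.toNat - '0'.toNat))
      · by_cases hu : z = '_' ∧ a = true
        · simp only [hu]
          by_cases hw : w.isDigit = true
          · simpa [hz, hw] using ih false acc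
          · simp [hw]
        · simp [hz, hu]

-- abstract none-lemma; at the use site G/F are pinned by unification to the (private)
-- digit-parsing core of PySem.Int.ofChars?, so this is the only way to reason about it
theorem pvDigitsNone (G : List Char → Option ℕ) (F : List Char → Bool → ℕ → Option ℕ) (c : Char)
    (_hPin : ∀ w, G ('1' :: w) = F w true 1)
    (hG : ∀ (m : List Char), m ≠ [] → G m = F m false 0)
    (hF1 : ∀ (d : Char) (a : Bool) (acc : ℕ), F [d] a acc =
      if d.isDigit = true then some (acc * 10 + (d.toNat - '0'.toNat))
      else if d = '_' ∧ a = true then none else none)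
    (hF2 : ∀ (d e : Char) (rest : List Char) (a : Bool) (acc : ℕ), F (d :: e :: rest) a acc =
      if d.isDigit = true then F (e :: rest) true (acc * 10 + (d.toNat - '0'.toNat))
      else if d = '_' ∧ a = true then (if e.isDigit = true then F (e :: rest) false acc else none)
      else none)
    (hcd : c.isDigit = false) (hcu : c ≠ '_') :
    ∀ (zs : List Char), G (zs ++ [c]) = none := by
  intro zs
  rw [hG _ (by simp)]
  exact pvGoNone F c hF1 hF2 hcd hcu zs false 0

theorem ofChars?_endsAlpha (xs : List Char) (c : Char)
    (hsp : PySem.Int.isIntSpace c = false)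
    (hcd : c.isDigit = false) (hcu : c ≠ '_') (hcm : c ≠ '-') (hcp : c ≠ '+') :
    PySem.Int.ofChars? (xs ++ [c]) = none := by
  simp only [PySem.Int.ofChars?]
  have key : (List.dropWhile PySem.Int.isIntSpace
      (List.dropWhile PySem.Int.isIntSpace (xs ++ [c])).reverse).reverse
      = List.dropWhile PySem.Int.isIntSpace xs ++ [c] := by
    rw [List.dropWhile_append]
    by_cases hys : (List.dropWhile PySem.Int.isIntSpace xs).isEmpty = true
    · rw [if_pos hys]
      simp only [List.dropWhile_cons, hsp, if_false, List.dropWhile_nil,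
        List.reverse_cons, List.reverse_nil, List.nil_append, Bool.false_eq_true]
      rw [List.isEmpty_iff.mp hys, List.nil_append]
    · rw [if_neg hys]
      rw [List.reverse_append, List.reverse_singleton, List.singleton_append, List.dropWhile_cons]
      simp [hsp]
  rw [key]
  split
  · rename_i ds heq
    cases hw : List.dropWhile PySem.Int.isIntSpace xs with
    | nil =>
      rw [hw, List.nil_append] at heq
      injection heq with h1 _
      exact absurd h1 hcm
    | cons u us =>
      rw [hw, List.cons_append] at heq
      injection heq with h1 h2
      subst h2
      apply pvMapBindNone
      refine pvDigitsNone _ ?F c ?hPin ?hG ?hF1 ?hF2 hcd hcu us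
      case hPin => intro w; rfl
      case hG =>
        intro m hm
        cases m with
        | nil => exact absurd rfl hm
        | cons y l => rfl
      case hF1 => intro d a acc; rfl
      case hF2 => intro d e rest a acc; rfl
  · rename_i ds heq
    cases hw : List.dropWhile PySem.Int.isIntSpace xs with
    | nil =>
      rw [hw, List.nil_append] at heq
      injection heq with h1 _
      exact absurd h1 hcp
    | cons u us =>
      rw [hw, List.cons_append] at heq
      injection heq with h1 h2
      subst h2
      apply pvMapBindNone
      refine pvDigitsNone _ ?F c ?hPin ?hG ?hF1 ?hF2 hcd hcu us
      case hPin => intro w; rfl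
      case hG =>
        intro m hm
        cases m with
        | nil => exact absurd rfl hm
        | cons y l => rfl
      case hF1 => intro d a acc; rfl
      case hF2 => intro d e rest a acc; rfl
  · apply pvMapBindNone
    refine pvDigitsNone _ ?F c ?hPin ?hG ?hF1 ?hF2 hcd hcu _
    case hPin => intro w; rfl
    case hG =>
      intro m hm
      cases m with
      | nil => exact absurd rfl hm
      | cons y l => rfl
    case hF1 => intro d a acc; rfl
    case hF2 => intro d e rest a acc; rfl

-- facts about alphabetic characters
theorem pvCharLe {a b : Char} (h : a ≤ b) : a.toNat ≤ b.toNat := h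

theorem alpha_range {c : Char} (h : PySem.Chars.isalpha c = true) :
    ('A' ≤ c ∧ c ≤ 'Z') ∨ ('a' ≤ c ∧ c ≤ 'z') := by
  simp only [PySem.Chars.isalpha, PySem.Chars.isupper, PySem.Chars.islower,
    Bool.or_eq_true, decide_eq_true_eq, Bool.and_eq_true] at h
  tauto

theorem alpha_ne {c d : Char} (h : PySem.Chars.isalpha c = true)
    (hd : PySem.Chars.isalpha d = false) : c ≠ d := by
  rintro rfl; rw [h] at hd; cases hd

theorem alpha_not_digit {c : Char} (h : PySem.Chars.isalpha c = true) : c.isDigit = false := by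
  simp only [Char.isDigit, Bool.and_eq_false_iff, decide_eq_false_iff_not]
  rcases alpha_range h with ⟨h1, _⟩ | ⟨h1, _⟩ <;>
  · right
    intro hc
    have a1 := pvCharLe hc
    have a2 := pvCharLe h1
    rw [show '9'.toNat = 57 from rfl] at a1
    first
    | (rw [show 'A'.toNat = 65 from rfl] at a2; omega)
    | (rw [show 'a'.toNat = 97 from rfl] at a2; omega)

theorem alpha_not_space {c : Char} (h : PySem.Chars.isalpha c = true) :
    PySem.Int.isIntSpace c = false := by
  simp only [PySem.Int.isIntSpace, Bool.or_eq_false_iff, decide_eq_false_iff_not]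
  refine ⟨⟨⟨⟨⟨?_, ?_⟩, ?_⟩, ?_⟩, ?_⟩, ?_⟩ <;> (rintro rfl; exact absurd h (by decide))

theorem ofChars?_concat_alpha (xs : List Char) (c : Char)
    (h : PySem.Chars.isalpha c = true) : PySem.Int.ofChars? (xs ++ [c]) = none := by
  refine ofChars?_endsAlpha xs c (alpha_not_space h) (alpha_not_digit h) ?_ ?_ ?_ <;>
    (rintro rfl; exact absurd h (by decide))

-- endswith on a one/two-character suffix, read off the last characters
theorem ends1 (ps : List Char) (c u : Char) :
    PySem.Chars.endswith (ps ++ [c]) [u] = (c == u) := by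
  simp only [PySem.Chars.endswith, List.isSuffixOf, List.reverse_append,
    List.reverse_singleton, List.singleton_append, List.isPrefixOf]
  cases h : (u == c) <;> simp_all [BEq.comm]

theorem ends2 (ps : List Char) (c u v : Char) :
    PySem.Chars.endswith (ps ++ [c]) [u, v] = ((v == c) && PySem.Chars.endswith ps [u]) := by
  simp only [PySem.Chars.endswith, List.isSuffixOf, List.reverse_append,
    List.isPrefixOf, List.reverse_cons, List.reverse_nil, List.nil_append, List.cons_append]

-- A's negative slices p[:-k], written on a concat-decomposed list
theorem slice_neg_one (ps : List Char) (c : Char) :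
    PySem.List.slice (ps ++ [c]) none (some (-1)) = ps := by
  rw [show ((-1 : Int)) = -((1 : Nat) : Int) from rfl,
    PySem.List.slice_to_neg_natCast _ 1 (by omega)]
  simp [List.take_left']

theorem slice_neg_two (ps : List Char) (b c : Char) :
    PySem.List.slice ((ps ++ [b]) ++ [c]) none (some (-2)) = ps := by
  rw [show ((-2 : Int)) = -((2 : Nat) : Int) from rfl,
    PySem.List.slice_to_neg_natCast _ 2 (by omega)]
  simp only [List.length_append, List.length_singleton]
  rw [show ps.length + 1 + 1 - 2 = ps.length by omega, List.append_assoc, List.take_left]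

-- B's nonnegative slices p[i:], p[:i] at i = q.length
theorem slice_from_len (q t : List Char) :
    PySem.List.slice (q ++ t) (some ((q.length : Nat) : Int)) none = t := by
  rw [PySem.List.slice_from _ (by positivity)]
  simp

theorem slice_to_len (q t : List Char) :
    PySem.List.slice (q ++ t) none (some ((q.length : Nat) : Int)) = q := by
  rw [PySem.List.slice_to _ (by positivity)]
  simp

-- the while loop only looks below its index
theorem runLoop_append (q t : List Char) :
    ∀ n, n ≤ q.length → runLoop (q ++ t) n = runLoop q n := by
  intro n
  induction n with
  | zero => intro _; rfl
  | succ i ih =>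
    intro h
    simp only [runLoop]
    rw [List.getD_append _ _ _ _ (by omega)]
    rw [ih (by omega)]

theorem runLoop_concat (q : List Char) (c : Char) :
    runLoop (q ++ [c]) (q.length + 1)
      = if PySem.Chars.isalpha c = true then runLoop q q.length else q.length + 1 := by
  simp only [runLoop]
  rw [List.getD_append_right _ _ _ _ (le_refl _)]
  simp only [Nat.sub_self, List.getD_cons_zero]
  rw [runLoop_append q [c] q.length (le_refl _)]

-- splitting off the maximal trailing alphabetic run
theorem runLoop_decomp (t : List Char) :
    ∀ q : List Char, (∀ x ∈ t, PySem.Chars.isalpha x = true) →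
      (q = [] ∨ ∃ qs b, q = qs ++ [b] ∧ PySem.Chars.isalpha b = false) →
      runLoop (q ++ t) (q ++ t).length = q.length := by
  induction t using List.reverseRecOn with
  | nil =>
    intro q _ hq
    rcases hq with rfl | ⟨qs, b, rfl, hb⟩
    · rfl
    · simp only [List.append_nil, List.length_append, List.length_singleton]
      rw [runLoop_concat, hb]
      simp
  | append_singleton ts x ih =>
    intro q ht hq
    have hx : PySem.Chars.isalpha x = true := ht x (by simp)
    have h1 : q ++ (ts ++ [x]) = (q ++ ts) ++ [x] := (List.append_assoc q ts [x]).symm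
    rw [h1]
    have h2 : ((q ++ ts) ++ [x]).length = (q ++ ts).length + 1 := by simp; omega
    rw [h2, runLoop_concat (q ++ ts) x, hx, if_pos rfl]
    exact ih q (fun y hy => ht y (by simp [hy])) hq

-- any list splits as q ++ t with t the maximal trailing alphabetic run
theorem exists_decomp (p : List Char) :
    ∃ q t, p = q ++ t ∧ (∀ x ∈ t, PySem.Chars.isalpha x = true) ∧
      (q = [] ∨ ∃ qs b, q = qs ++ [b] ∧ PySem.Chars.isalpha b = false) := by
  refine ⟨(p.reverse.dropWhile PySem.Chars.isalpha).reverse,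
    (p.reverse.takeWhile PySem.Chars.isalpha).reverse, ?_, ?_, ?_⟩
  · rw [← List.reverse_append, List.takeWhile_append_dropWhile, List.reverse_reverse]
  · intro x hx
    rw [List.mem_reverse] at hx
    exact List.mem_takeWhile_imp hx
  · cases hw : p.reverse.dropWhile PySem.Chars.isalpha with
    | nil => left; simp
    | cons y ys =>
      right
      refine ⟨ys.reverse, y, by simp, ?_⟩
      have := List.head?_dropWhile_not PySem.Chars.isalpha p.reverse
      rw [hw] at this
      simpa using this

-- the dict lookup, as a chain of list-equality tests
theorem get?_pm (u : List Char) :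
    PySem.Dict.get? pmDict u =
      if u = ['d'] then some 1 else if u = ['w','k'] then some 7
      else if u = ['m','o'] then some 30 else if u = ['y'] then some 365 else none := by
  have hit : pmDict.items = [(['d'], 1), (['w','k'], 7), (['m','o'], 30), (['y'], 365)] := rfl
  simp only [PySem.Dict.get?, hit, List.find?]
  by_cases h1 : u = ['d']
  · subst h1; simp
  · rw [if_neg h1, show ((['d'] : List Char) == u) = false from
      beq_eq_false_iff_ne.mpr (fun h => h1 h.symm)]
    by_cases h2 : u = ['w','k']
    · subst h2; simp
    · rw [if_neg h2, show ((['w','k'] : List Char) == u) = false from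
        beq_eq_false_iff_ne.mpr (fun h => h2 h.symm)]
      by_cases h3 : u = ['m','o']
      · subst h3; simp
      · rw [if_neg h3, show ((['m','o'] : List Char) == u) = false from
          beq_eq_false_iff_ne.mpr (fun h => h3 h.symm)]
        by_cases h4 : u = ['y']
        · subst h4; simp
        · rw [if_neg h4, show ((['y'] : List Char) == u) = false from
            beq_eq_false_iff_ne.mpr (fun h => h4 h.symm)]
          rfl

theorem pvBeqF {x y : Char} (h : x ≠ y) : (x == y) = false := beq_eq_false_iff_ne.mpr h

theorem ne_len {α : Type} {u k : List α} (h : u.length ≠ k.length) : u ≠ k :=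
  fun he => h (he ▸ rfl)

theorem ne_concat_last {ps : List Char} {c : Char} {k : List Char} {d : Char}
    (hk : k.getLast? = some d) (h : c ≠ d) : ps ++ [c] ≠ k := by
  intro he
  have := congrArg List.getLast? he
  rw [List.getLast?_concat, hk] at this
  exact h (Option.some.inj this)

-- endswith of the empty string
theorem ends_nil (u : Char) : PySem.Chars.endswith [] [u] = false := rfl

theorem ne_concat_two {t2 : List Char} {b c w k : Char} (h : b ≠ w) :
    (t2 ++ [b]) ++ [c] ≠ [w, k] := by
  intro he
  have h1 := congrArg List.dropLast he
  rw [List.dropLast_concat, show List.dropLast [w, k] = [w] from rfl] at h1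
  have h2 := congrArg List.getLast? h1
  rw [List.getLast?_concat, show List.getLast? [w] = some w from rfl] at h2
  exact h (Option.some.inj h2)

-- A's loop written out over the four units
theorem loopA (p : List Char) :
    periodLoop p periodMultipliers =
      if PySem.Chars.endswith p ['d'] = true then
        (match PySem.Int.ofChars? (PySem.List.slice p none (some (-1))) with
         | none => none | some n => some (n * 1))
      else if PySem.Chars.endswith p ['w','k'] = true then
        (match PySem.Int.ofChars? (PySem.List.slice p none (some (-2))) with
         | none => none | some n => some (n * 7))
      else if PySem.Chars.endswith p ['m','o'] = true then
        (match PySem.Int.ofChars? (PySem.List.slice p none (some (-2))) with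
         | none => none | some n => some (n * 30))
      else if PySem.Chars.endswith p ['y'] = true then
        (match PySem.Int.ofChars? (PySem.List.slice p none (some (-1))) with
         | none => none | some n => some (n * 365))
      else none := rfl

theorem loopA_d (x : List Char) :
    periodLoop (x ++ ['d']) periodMultipliers =
      (match PySem.Int.ofChars? x with | none => none | some n => some (n * 1)) := by
  rw [loopA, if_pos (by rw [ends1]; rfl), slice_neg_one]

theorem loopA_y (x : List Char) :
    periodLoop (x ++ ['y']) periodMultipliers =
      (match PySem.Int.ofChars? x with | none => none | some n => some (n * 365)) := by
  rw [loopA, if_neg (by rw [ends1]; simp), if_neg (by rw [ends2]; simp),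
    if_neg (by rw [ends2]; simp), if_pos (by rw [ends1]; rfl), slice_neg_one]

theorem loopA_wk (x : List Char) :
    periodLoop ((x ++ ['w']) ++ ['k']) periodMultipliers =
      (match PySem.Int.ofChars? x with | none => none | some n => some (n * 7)) := by
  rw [loopA, if_neg (by rw [ends1]; simp),
    if_pos (by rw [ends2, ends1]; rfl), slice_neg_two]

theorem loopA_mo (x : List Char) :
    periodLoop ((x ++ ['m']) ++ ['o']) periodMultipliers =
      (match PySem.Int.ofChars? x with | none => none | some n => some (n * 30)) := by
  rw [loopA, if_neg (by rw [ends1]; simp), if_neg (by rw [ends2, ends1]; simp),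
    if_pos (by rw [ends2, ends1]; rfl), slice_neg_two]

theorem loopA_none (x : List Char) (c : Char) (hd : c ≠ 'd') (hy : c ≠ 'y')
    (hwk : PySem.Chars.endswith (x ++ [c]) ['w','k'] = false)
    (hmo : PySem.Chars.endswith (x ++ [c]) ['m','o'] = false) :
    periodLoop (x ++ [c]) periodMultipliers = none := by
  rw [loopA, if_neg (by rw [ends1, pvBeqF hd]; simp), if_neg (by rw [hwk]; simp),
    if_neg (by rw [hmo]; simp), if_neg (by rw [ends1, pvBeqF hy]; simp)]

theorem core_eq (p : List Char) :
    periodLoop p periodMultipliers =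
      (match PySem.Dict.get? pmDict (PySem.List.slice p (some ((runLoop p p.length : Nat) : Int)) none) with
      | none => none
      | some m =>
        match PySem.Int.ofChars? (PySem.List.slice p none (some ((runLoop p p.length : Nat) : Int))) with
        | none => none
        | some n => some (n * m)) := by
  obtain ⟨q, t, rfl, ht, hq⟩ := exists_decomp p
  rw [runLoop_decomp t q ht hq, slice_from_len, slice_to_len, get?_pm]
  rcases List.eq_nil_or_concat' t with rfl | ⟨t1, c, rfl⟩
  · -- t = [] : the string has no trailing alphabetic character; both sides are none
    rw [if_neg (by simp), if_neg (by simp), if_neg (by simp), if_neg (by simp), List.append_nil]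
    rcases hq with rfl | ⟨qs, b, rfl, hb⟩
    · rfl
    · rw [loopA_none qs b (Ne.symm (alpha_ne (by decide) hb)) (Ne.symm (alpha_ne (by decide) hb))
        (by rw [ends2, pvBeqF (alpha_ne (by decide) hb)]; rfl)
        (by rw [ends2, pvBeqF (alpha_ne (by decide) hb)]; rfl)]
  · have hc : PySem.Chars.isalpha c = true := ht c (by simp)
    rcases List.eq_nil_or_concat' t1 with rfl | ⟨t2, b, rfl⟩
    · -- t = [c] : a one-character unit
      simp only [List.nil_append] at ht ⊢
      by_cases hcd : c = 'd'
      · subst hcd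
        rw [if_pos rfl, loopA_d q]
      · by_cases hck : c = 'k'
        · subst hck
          rw [if_neg (by decide), if_neg (by decide), if_neg (by decide), if_neg (by decide)]
          have hqw : PySem.Chars.endswith q ['w'] = false := by
            rcases hq with rfl | ⟨qs, b, rfl, hb⟩
            · exact ends_nil 'w'
            · rw [ends1]; exact pvBeqF (Ne.symm (alpha_ne (by decide) hb))
          rw [loopA_none q 'k' (by decide) (by decide)
            (by rw [ends2, hqw]; rfl) (by rw [ends2]; rfl)]
        · by_cases hco : c = 'o'
          · subst hco
            rw [if_neg (by decide), if_neg (by decide), if_neg (by decide), if_neg (by decide)]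
            have hqm : PySem.Chars.endswith q ['m'] = false := by
              rcases hq with rfl | ⟨qs, b, rfl, hb⟩
              · exact ends_nil 'm'
              · rw [ends1]; exact pvBeqF (Ne.symm (alpha_ne (by decide) hb))
            rw [loopA_none q 'o' (by decide) (by decide)
              (by rw [ends2]; rfl) (by rw [ends2, hqm]; rfl)]
          · by_cases hcy : c = 'y'
            · subst hcy
              rw [if_neg (by decide), if_neg (by decide), if_neg (by decide), if_pos rfl,
                loopA_y q]
            · rw [if_neg (by simp [hcd]), if_neg (by simp), if_neg (by simp),
                if_neg (by simp [hcy])]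
              rw [loopA_none q c hcd hcy
                (by rw [ends2, pvBeqF (Ne.symm hck)]; rfl)
                (by rw [ends2, pvBeqF (Ne.symm hco)]; rfl)]
    · -- t = (t2 ++ [b]) ++ [c] : at least two trailing alphabetic characters
      have hb : PySem.Chars.isalpha b = true := ht b (by simp)
      have hP : q ++ ((t2 ++ [b]) ++ [c]) = ((q ++ t2) ++ [b]) ++ [c] := by
        simp [List.append_assoc]
      rw [hP]
      by_cases hcd : c = 'd'
      · subst hcd
        rw [if_neg (ne_len (by simp)), if_neg (ne_concat_last rfl (by decide)),
          if_neg (ne_concat_last rfl (by decide)), if_neg (ne_concat_last rfl (by decide)),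
          loopA_d ((q ++ t2) ++ [b]), ofChars?_concat_alpha (q ++ t2) b hb]
      · by_cases hck : c = 'k'
        · subst hck
          by_cases hbw : b = 'w'
          · subst hbw
            rcases List.eq_nil_or_concat' t2 with rfl | ⟨t3, a, rfl⟩
            · rw [if_neg (by decide), if_pos (by simp), List.append_nil, loopA_wk q]
            · have ha : PySem.Chars.isalpha a = true := ht a (by simp)
              rw [if_neg (ne_len (by simp)), if_neg (ne_len (by simp)),
                if_neg (ne_len (by simp)), if_neg (ne_len (by simp)),
                loopA_wk (q ++ (t3 ++ [a])),
                show q ++ (t3 ++ [a]) = (q ++ t3) ++ [a] from (List.append_assoc q t3 [a]).symm,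
                ofChars?_concat_alpha (q ++ t3) a ha]
          · rw [if_neg (ne_len (by simp)), if_neg (ne_concat_two hbw),
              if_neg (ne_concat_last rfl (by decide)), if_neg (ne_len (by simp)),
              loopA_none ((q ++ t2) ++ [b]) 'k' (by decide) (by decide)
                (by rw [ends2, ends1, pvBeqF hbw]; rfl) (by rw [ends2]; rfl)]
        · by_cases hco : c = 'o'
          · subst hco
            by_cases hbm : b = 'm'
            · subst hbm
              rcases List.eq_nil_or_concat' t2 with rfl | ⟨t3, a, rfl⟩
              · rw [if_neg (by decide), if_neg (by decide), if_pos (by simp),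
                  List.append_nil, loopA_mo q]
              · have ha : PySem.Chars.isalpha a = true := ht a (by simp)
                rw [if_neg (ne_len (by simp)), if_neg (ne_len (by simp)),
                  if_neg (ne_len (by simp)), if_neg (ne_len (by simp)),
                  loopA_mo (q ++ (t3 ++ [a])),
                  show q ++ (t3 ++ [a]) = (q ++ t3) ++ [a] from (List.append_assoc q t3 [a]).symm,
                  ofChars?_concat_alpha (q ++ t3) a ha]
            · rw [if_neg (ne_len (by simp)), if_neg (ne_concat_last rfl (by decide)),
                if_neg (ne_concat_two hbm), if_neg (ne_len (by simp)),
                loopA_none ((q ++ t2) ++ [b]) 'o' (by decide) (by decide)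
                  (by rw [ends2]; rfl) (by rw [ends2, ends1, pvBeqF hbm]; rfl)]
          · by_cases hcy : c = 'y'
            · subst hcy
              rw [if_neg (ne_concat_last rfl (by decide)), if_neg (ne_concat_last rfl (by decide)),
                if_neg (ne_concat_last rfl (by decide)), if_neg (ne_len (by simp)),
                loopA_y ((q ++ t2) ++ [b]), ofChars?_concat_alpha (q ++ t2) b hb]
            · rw [if_neg (ne_concat_last rfl hcd), if_neg (ne_concat_last rfl hck),
                if_neg (ne_concat_last rfl hco), if_neg (ne_concat_last rfl hcy),
                loopA_none ((q ++ t2) ++ [b]) c hcd hcy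
                  (by rw [ends2, pvBeqF (Ne.symm hck)]; rfl)
                  (by rw [ends2, pvBeqF (Ne.symm hco)]; rfl)]

-- ===== VERDICT (by name: the statement is the Claim_ definition above) =====
theorem period_to_days_py_spec : Claim_equal_period_to_days_py := by
  intro period _
  unfold Spec_period_to_days_py period_to_days_py period_to_days_py_alt
  by_cases h1 : period.toList = []
  · rw [if_pos h1, if_pos h1]
  · rw [if_neg h1, if_neg h1]
    by_cases h2 : PySem.Chars.lower (PySem.Chars.strip period.toList) = ['m','a','x']
    · rw [if_pos h2, if_pos h2]
    · rw [if_neg h2, if_neg h2]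
      exact core_eq _
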